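-- pv_equiv track=rewrite | github.com/amans4149/contract_info_extractor | functions/commons/preprocess.py | get_all_numerals
-- ===== SOURCE A (Python) =====
-- def get_all_numerals(sentence):
--     numbers_context = []
--     for w in range(0,len(sentence)):
--         ##Check for CD as POS tag of each word of the sentence
--         if sentence[w][1]=='CD':
--             ##push in context. Ensure the context exists irrespective of position of 'CD' within a sentence
--             if w > 1:
--                 numbers_context.append(sentence[w-2])
--             if w > 0:
--                 numbers_context.append(sentence[w-1])
--             numbers_context.append(sentence[w])
--             if w < len(sentence)-1:
--                 numbers_context.append(sentence[w+1])
--             if w < len(sentence)-2: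
--                 numbers_context.append(sentence[w+2])
--     return numbers_context
-- ===== SOURCE B (Python) =====
-- def get_all_numerals(sentence):
--     # Structural recursion over the sentence: no indices at all; carry the last
--     # (at most two) already-seen tokens as a history buffer, and when the head
--     # is CD-tagged emit history + head + the next two tokens of the suffix.
--     def go(prev, rest):
--         if not rest:
--             return []
--         head = rest[0]
--         tail = rest[1:]
--         out = go((prev + [head])[-2:], tail)
--         if head[1] == 'CD':
--             return prev + [head] + tail[:2] + out
--         return out
--     return go([], list(sentence))
-- ===== Notes on version B (the rewrite author's own statement) =====
-- stated objective: alternative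
-- what changed: Replaced the random-access index loop with boundary-guard branches by index-free structural recursion over the list that carries a two-token history buffer and emits history + head + next-two-of-the-suffix at each CD tag.
import Mathlib
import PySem

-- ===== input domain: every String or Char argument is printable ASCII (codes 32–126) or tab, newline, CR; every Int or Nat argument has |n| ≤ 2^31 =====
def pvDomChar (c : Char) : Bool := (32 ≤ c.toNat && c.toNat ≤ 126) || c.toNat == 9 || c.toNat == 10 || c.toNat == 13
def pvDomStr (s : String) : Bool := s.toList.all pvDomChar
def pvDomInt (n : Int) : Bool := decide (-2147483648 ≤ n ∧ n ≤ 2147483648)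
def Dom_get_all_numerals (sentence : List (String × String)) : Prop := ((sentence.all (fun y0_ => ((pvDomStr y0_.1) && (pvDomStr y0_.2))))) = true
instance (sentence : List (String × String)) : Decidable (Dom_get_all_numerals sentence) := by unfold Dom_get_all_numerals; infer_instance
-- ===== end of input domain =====

-- B replaces A's random-access index loop with guard branches by index-free structural recursion
-- carrying a two-token history buffer (objective: alternative decomposition, same cost).

-- ===== PORT A =====
def get_all_numerals (sentence : List (String × String)) : List (String × String) :=
  (PySem.List.pyRange 0 (PySem.List.len sentence) 1).foldl
    (fun numbers_context w =>
      if (PySem.List.pyGetD sentence w ("", "")).2 == "CD" then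
        let numbers_context := if 1 < w then numbers_context ++ [PySem.List.pyGetD sentence (w - 2) ("", "")] else numbers_context
        let numbers_context := if 0 < w then numbers_context ++ [PySem.List.pyGetD sentence (w - 1) ("", "")] else numbers_context
        let numbers_context := numbers_context ++ [PySem.List.pyGetD sentence w ("", "")]
        let numbers_context := if w < PySem.List.len sentence - 1 then numbers_context ++ [PySem.List.pyGetD sentence (w + 1) ("", "")] else numbers_context
        let numbers_context := if w < PySem.List.len sentence - 2 then numbers_context ++ [PySem.List.pyGetD sentence (w + 2) ("", "")] else numbers_context
        numbers_context
      else numbers_context)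
    []

-- ===== PORT B =====
-- Source B's inner 'go(prev, rest)': structural recursion on the suffix, history buffer 'prev'
def pvGo (prev : List (String × String)) : List (String × String) → List (String × String)
  | [] => []
  | head :: tail =>
    let out := pvGo (PySem.List.slice (prev ++ [head]) (some (-2)) none) tail
    if head.2 == "CD" then prev ++ [head] ++ PySem.List.slice tail none (some 2) ++ out else out

def get_all_numerals_alt (sentence : List (String × String)) : List (String × String) :=
  pvGo [] sentence

-- ===== PRECONDITION & SPEC =====
def Spec_get_all_numerals (sentence : List (String × String)) (out : List (String × String)) : Prop := out = get_all_numerals_alt sentence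
instance (sentence : List (String × String)) (out : List (String × String)) : Decidable (Spec_get_all_numerals sentence out) := by unfold Spec_get_all_numerals; infer_instance

-- ===== CLAIM =====
def Claim_equal_get_all_numerals : Prop := ∀ (sentence : List (String × String)), Dom_get_all_numerals sentence → Spec_get_all_numerals sentence (get_all_numerals sentence)

-- ===== LEMMAS AND PROOFS =====

-- the upper (right) part of the context window: take 3 after dropping k, as guarded singletons
theorem pv_tail3 (s : List (String × String)) (k : Nat) (h : k < s.length) (d : String × String) :
    (s.drop k).take 3 =
      s.getD k d :: ((if k + 1 < s.length then [s.getD (k + 1) d] else []) ++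
                     (if k + 2 < s.length then [s.getD (k + 2) d] else [])) := by
  have e0 : s.drop k = s[k] :: s.drop (k + 1) := List.drop_eq_getElem_cons h
  rw [e0, List.getD_eq_getElem s d h]
  by_cases h1 : k + 1 < s.length
  · have e1 : s.drop (k + 1) = s[k + 1] :: s.drop (k + 2) := List.drop_eq_getElem_cons h1
    rw [e1, if_pos h1, List.getD_eq_getElem s d h1]
    by_cases h2 : k + 2 < s.length
    · have e2 : s.drop (k + 2) = s[k + 2] :: s.drop (k + 3) := List.drop_eq_getElem_cons h2
      rw [e2, if_pos h2, List.getD_eq_getElem s d h2]; rfl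
    · have e2 : s.drop (k + 2) = [] := List.drop_eq_nil_of_le (by omega)
      rw [e2, if_neg h2]; rfl
  · have e1 : s.drop (k + 1) = [] := List.drop_eq_nil_of_le (by omega)
    rw [e1, if_neg h1, if_neg (by omega : ¬ k + 2 < s.length)]; rfl

-- A's guarded window at a valid index equals the clamped drop/take window
theorem pv_window (s : List (String × String)) (k : Nat) (h : k < s.length) (d : String × String) :
    ((if 1 < (k:Int) then [PySem.List.pyGetD s ((k:Int) - 2) d] else []) ++
     ((if 0 < (k:Int) then [PySem.List.pyGetD s ((k:Int) - 1) d] else []) ++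
      (PySem.List.pyGetD s (k:Int) d ::
        ((if (k:Int) < (s.length:Int) - 1 then [PySem.List.pyGetD s ((k:Int) + 1) d] else []) ++
         (if (k:Int) < (s.length:Int) - 2 then [PySem.List.pyGetD s ((k:Int) + 2) d] else []))))) =
      (s.drop (k - 2)).take (k + 3 - (k - 2)) := by
  match k, h with
  | 0, h =>
    rw [if_neg (by omega : ¬ (1:Int) < ((0:Nat):Int)), if_neg (by omega : ¬ (0:Int) < ((0:Nat):Int)),
        show (((0:Nat):Int)) + 1 = ((1:Nat):Int) by norm_num,
        show (((0:Nat):Int)) + 2 = ((2:Nat):Int) by norm_num]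
    simp only [show ((0:Nat):Int) < (s.length:Int) - 1 ↔ 0 + 1 < s.length from by omega,
               show ((0:Nat):Int) < (s.length:Int) - 2 ↔ 0 + 2 < s.length from by omega,
               PySem.List.pyGetD_natCast]
    rw [← pv_tail3 s 0 h d]
    rfl
  | 1, h =>
    rw [if_neg (by omega : ¬ (1:Int) < ((1:Nat):Int)), if_pos (by omega : (0:Int) < ((1:Nat):Int)),
        show (((1:Nat):Int)) - 1 = ((0:Nat):Int) by norm_num,
        show (((1:Nat):Int)) + 1 = ((2:Nat):Int) by norm_num,
        show (((1:Nat):Int)) + 2 = ((3:Nat):Int) by norm_num]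
    simp only [show ((1:Nat):Int) < (s.length:Int) - 1 ↔ 1 + 1 < s.length from by omega,
               show ((1:Nat):Int) < (s.length:Int) - 2 ↔ 1 + 2 < s.length from by omega,
               PySem.List.pyGetD_natCast]
    rw [← pv_tail3 s 1 h d]
    have e0 : s.drop 0 = s.getD 0 d :: s.drop 1 := by
      rw [List.getD_eq_getElem s d (by omega)]; exact List.drop_eq_getElem_cons (by omega)
    rw [show (1:Nat) - 2 = 0 from rfl, e0]
    rfl
  | (m+2), h =>
    rw [if_pos (by push_cast; omega : (1:Int) < ((m+2:Nat):Int)),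
        if_pos (by push_cast; omega : (0:Int) < ((m+2:Nat):Int)),
        show (((m+2:Nat):Int)) - 2 = ((m:Nat):Int) by push_cast; ring,
        show (((m+2:Nat):Int)) - 1 = ((m+1:Nat):Int) by push_cast; ring,
        show (((m+2:Nat):Int)) + 1 = ((m+3:Nat):Int) by push_cast; ring,
        show (((m+2:Nat):Int)) + 2 = ((m+4:Nat):Int) by push_cast; ring]
    simp only [show ((m+2:Nat):Int) < (s.length:Int) - 1 ↔ m + 2 + 1 < s.length from by push_cast; omega,
               show ((m+2:Nat):Int) < (s.length:Int) - 2 ↔ m + 2 + 2 < s.length from by push_cast; omega,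
               PySem.List.pyGetD_natCast]
    have e0 : s.drop m = s.getD m d :: s.drop (m+1) := by
      rw [List.getD_eq_getElem s d (by omega)]; exact List.drop_eq_getElem_cons (by omega)
    have e1 : s.drop (m+1) = s.getD (m+1) d :: s.drop (m+2) := by
      rw [List.getD_eq_getElem s d (by omega)]; exact List.drop_eq_getElem_cons (by omega)
    have ht := pv_tail3 s (m+2) h d
    calc [s.getD m d] ++ ([s.getD (m+1) d] ++ (s.getD (m+2) d :: ((if m+2+1 < s.length then [s.getD (m+2+1) d] else []) ++ (if m+2+2 < s.length then [s.getD (m+2+2) d] else []))))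
        = s.getD m d :: s.getD (m+1) d :: (s.drop (m+2)).take 3 := by rw [ht]; rfl
      _ = (s.drop (m+2-2)).take (m+2+3 - (m+2-2)) := by
          rw [show m+2-2 = m from rfl, e0, e1, show m+2+3-m = 5 from by omega]; rfl

-- A's per-index contribution
def pvG (s : List (String × String)) (w : Int) : List (String × String) :=
  if (PySem.List.pyGetD s w ("", "")).2 == "CD" then
    (if 1 < w then [PySem.List.pyGetD s (w - 2) ("", "")] else []) ++
    ((if 0 < w then [PySem.List.pyGetD s (w - 1) ("", "")] else []) ++
     (PySem.List.pyGetD s w ("", "") ::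
       ((if w < PySem.List.len s - 1 then [PySem.List.pyGetD s (w + 1) ("", "")] else []) ++
        (if w < PySem.List.len s - 2 then [PySem.List.pyGetD s (w + 2) ("", "")] else []))))
  else []

-- A equals the flatMap of its per-index contributions
theorem pvA_flatMap (s : List (String × String)) :
    get_all_numerals s = (PySem.List.pyRange 0 (PySem.List.len s) 1).flatMap (pvG s) := by
  rw [get_all_numerals]
  have hstep : (fun (numbers_context : List (String × String)) (w : Int) =>
      if (PySem.List.pyGetD s w ("", "")).2 == "CD" then
        let numbers_context := if 1 < w then numbers_context ++ [PySem.List.pyGetD s (w - 2) ("", "")] else numbers_context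
        let numbers_context := if 0 < w then numbers_context ++ [PySem.List.pyGetD s (w - 1) ("", "")] else numbers_context
        let numbers_context := numbers_context ++ [PySem.List.pyGetD s w ("", "")]
        let numbers_context := if w < PySem.List.len s - 1 then numbers_context ++ [PySem.List.pyGetD s (w + 1) ("", "")] else numbers_context
        let numbers_context := if w < PySem.List.len s - 2 then numbers_context ++ [PySem.List.pyGetD s (w + 2) ("", "")] else numbers_context
        numbers_context
      else numbers_context) = fun acc w => acc ++ pvG s w := by
    funext acc w
    simp only [pvG]
    split_ifs <;> simp
  rw [hstep, PySem.List.foldl_append_eq_flatMap, List.nil_append]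

-- B's invariant: with history = the last ≤2 tokens of the prefix, go computes the remaining windows
theorem pvGo_inv (s : List (String × String)) :
    ∀ (t a : List (String × String)), s = a ++ t →
      pvGo (a.drop (a.length - 2)) t =
        (PySem.List.pyRange (a.length : Int) (PySem.List.len s) 1).flatMap (pvG s) := by
  intro t
  induction t with
  | nil =>
    intro a hs
    have hlen : PySem.List.len s = (a.length : Int) := by
      subst hs; simp [PySem.List.len]
    rw [hlen]
    simp [pvGo, PySem.List.pyRange]
  | cons h t ih =>
    intro a hs
    have hk : a.length < s.length := by simp [hs]
    -- the updated history buffer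
    have hprev : PySem.List.slice (a.drop (a.length - 2) ++ [h]) (some (-2)) none =
        (a ++ [h]).drop ((a ++ [h]).length - 2) := by
      rw [PySem.List.slice_from_neg_ofNat _ 2 (by omega)]
      rw [List.drop_append, List.drop_append, List.drop_drop]
      simp only [List.length_append, List.length_drop, List.length_cons, List.length_nil]
      congr 2 <;> omega
    have hrange : PySem.List.pyRange (a.length : Int) (PySem.List.len s) 1 =
        (a.length : Int) :: PySem.List.pyRange ((a.length : Int) + 1) (PySem.List.len s) 1 := by
      apply PySem.List.pyRange_one_cons
      simp [PySem.List.len]; exact_mod_cast hk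
    have ihlen : ((a ++ [h]).length : Int) = (a.length : Int) + 1 := by simp
    have ih' := ih (a ++ [h]) (by simp [hs])
    rw [ihlen] at ih'
    -- head of s at index a.length is h
    have hget : PySem.List.pyGetD s (a.length : Int) ("", "") = h := by
      rw [PySem.List.pyGetD_natCast]
      rw [hs, List.getD_eq_getElem _ _ (by simp)]
      rw [List.getElem_append_right (by omega)]
      simp
    show pvGo (a.drop (a.length - 2)) (h :: t) = _
    rw [pvGo, hprev, ih', hrange, List.flatMap_cons]
    by_cases hcd : h.2 == "CD"
    · rw [if_pos hcd]
      have hG : pvG s (a.length : Int) = a.drop (a.length - 2) ++ [h] ++ t.take 2 := by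
        rw [pvG, hget, if_pos hcd, ← hget]
        rw [show PySem.List.len s = (s.length : Int) from by simp [PySem.List.len]]
        rw [pv_window s a.length hk ("", "")]
        -- drop/take window over s = a ++ h :: t splits as history ++ h :: next two
        rw [hs, List.drop_append,
            show a.length - 2 - a.length = 0 from by omega, List.drop_zero,
            List.take_append]
        have hl : (a.drop (a.length - 2)).length = a.length - (a.length - 2) := by simp
        rw [List.take_of_length_le (by rw [hl]; omega), hl,
            show a.length + 3 - (a.length - 2) - (a.length - (a.length - 2)) = 3 from by omega]
        simp
      rw [hG, show PySem.List.slice t none (some 2) = t.take 2 from by simp [pysem]]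
    · rw [if_neg hcd]
      have hG : pvG s (a.length : Int) = [] := by
        rw [pvG, hget, if_neg hcd]
      rw [hG, List.nil_append]

-- ===== VERDICT =====
theorem get_all_numerals_spec : Claim_equal_get_all_numerals := by
  intro s _
  show get_all_numerals s = get_all_numerals_alt s
  rw [pvA_flatMap, get_all_numerals_alt]
  have := pvGo_inv s s [] rfl
  simpa using this.symm
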